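-- pv_equiv track=rewrite | github.com/verisimilitude20201/competitive-programming | Leet_Coding/Array/1051_Height_Checker.py | heightChecker1
-- ===== SOURCE A (Python) =====
-- from typing import List
--
-- def heightChecker1(heights: List[int]) -> int:
--     i = 0
--     j = 0
--     expected = heights.copy()
--     expected.sort()
--     mismatch_cnt = 0
--     while i < len(heights) and j < len(expected):
--         if heights[i] != expected[j]:
--             mismatch_cnt += 1
--
--         i += 1
--         j += 1
--
--     return mismatch_cnt
-- ===== SOURCE B (Python) =====
-- def heightChecker1(heights):
--     cnt = {}
--     for h in heights:
--         cnt[h] = cnt.get(h, 0) + 1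
--     expected = []
--     for k in sorted(cnt):
--         expected += [k] * cnt[k]
--     mismatch = 0
--     for h, e in zip(heights, expected):
--         if h != e:
--             mismatch += 1
--     return mismatch
-- ===== Notes on version B (the rewrite author's own statement) =====
-- stated objective: alternative
-- what changed: B replaces A's full sort-and-index-walk by a counting approach: it builds a frequency dict in one pass, reconstructs the sorted sequence by expanding the sorted distinct keys by their counts, and counts mismatches with zip.
import Mathlib
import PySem

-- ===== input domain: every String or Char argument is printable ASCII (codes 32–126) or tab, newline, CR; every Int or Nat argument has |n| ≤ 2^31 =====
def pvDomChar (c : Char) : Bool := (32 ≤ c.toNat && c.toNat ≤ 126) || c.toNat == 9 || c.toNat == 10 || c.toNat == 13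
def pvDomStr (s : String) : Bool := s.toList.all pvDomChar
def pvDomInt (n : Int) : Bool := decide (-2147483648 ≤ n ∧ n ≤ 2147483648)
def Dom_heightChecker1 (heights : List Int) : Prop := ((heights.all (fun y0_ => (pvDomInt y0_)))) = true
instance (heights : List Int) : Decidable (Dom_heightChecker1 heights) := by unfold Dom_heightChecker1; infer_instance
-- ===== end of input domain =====

-- B rebuilds the sorted sequence from a one-pass frequency dict (sorted distinct keys expanded by
-- their counts) instead of sorting the whole list; alternative algorithm, same exact result.

-- ===== PORT A =====
-- the while loop walks heights and expected in lockstep (i and j advance together),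
-- so it is transcribed as simultaneous structural recursion on the two lists
def heightChecker1Loop : List Int → List Int → Int → Int
  | a :: as, b :: bs, c => heightChecker1Loop as bs (if a ≠ b then c + 1 else c)
  | _, _, c => c

def heightChecker1 (heights : List Int) : Int :=
  let expected := PySem.List.sorted heights (fun x => x) false
  heightChecker1Loop heights expected 0

-- ===== PORT B =====
def heightChecker1_alt (heights : List Int) : Int :=
  let cnt := heights.foldl (fun d h => d.insert h (d.getD h 0 + 1)) (PySem.Dict.empty : PySem.Dict Int Int)
  -- cnt[k] for k drawn from cnt's own keys is always present, so getD is exact here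
  let expected := (PySem.List.sorted cnt.keys (fun x => x) false).foldl
      (fun acc k => acc ++ List.replicate (cnt.getD k 0).toNat k) []
  (heights.zip expected).foldl (fun m p => if p.1 ≠ p.2 then m + 1 else m) 0

-- ===== PRECONDITION & SPEC =====
def Spec_heightChecker1 (heights : List Int) (out : Int) : Prop := out = heightChecker1_alt heights
instance (heights : List Int) (out : Int) : Decidable (Spec_heightChecker1 heights out) := by unfold Spec_heightChecker1; infer_instance

-- ===== CLAIM (what is proved, stated in full; the proofs are below) =====
def Claim_equal_heightChecker1 : Prop := ∀ (heights : List Int), Dom_heightChecker1 heights → Spec_heightChecker1 heights (heightChecker1 heights)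

-- ===== LEMMAS AND PROOFS =====

-- A's lockstep while loop equals B's fold over the zipped pair of lists (common counting skeleton)
theorem loop_eq_zip_foldl (xs ys : List Int) (c : Int) :
    heightChecker1Loop xs ys c
      = (xs.zip ys).foldl (fun m p => if p.1 ≠ p.2 then m + 1 else m) c := by
  induction xs generalizing ys c with
  | nil => cases ys <;> simp [heightChecker1Loop]
  | cons a as ih => cases ys <;> simp [heightChecker1Loop, ih]

-- count of v in the expansion of distinct keys by replicate
theorem count_flat_replicate (ks : List Int) (f : Int → Nat) (v : Int) (hnd : ks.Nodup) :
    (ks.flatMap (fun k => List.replicate (f k) k)).count v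
      = if v ∈ ks then f v else 0 := by
  induction ks with
  | nil => simp
  | cons k ks ih =>
    simp only [List.nodup_cons] at hnd
    simp only [List.flatMap_cons, List.count_append, ih hnd.2, List.count_replicate,
      List.mem_cons]
    by_cases hv : v = k
    · subst hv
      simp [hnd.1]
    · simp [hv, Ne.symm hv]

-- the expansion of a strictly increasing key list is nondecreasing
theorem pairwise_flat_replicate (ks : List Int) (f : Int → Nat)
    (h : ks.Pairwise (· < ·)) :
    (ks.flatMap (fun k => List.replicate (f k) k)).Pairwise (· ≤ ·) := by
  induction ks with
  | nil => simp
  | cons k ks ih =>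
    rw [List.pairwise_cons] at h
    simp only [List.flatMap_cons]
    rw [List.pairwise_append]
    refine ⟨List.pairwise_replicate.mpr (Or.inr le_rfl), ih h.2, ?_⟩
    intro a ha b hb
    rw [List.eq_of_mem_replicate ha]
    rcases List.mem_flatMap.mp hb with ⟨k', hk', hb'⟩
    rw [List.eq_of_mem_replicate hb']
    exact le_of_lt (h.1 k' hk')

-- B's expanded list IS sorted(heights)
theorem expand_eq_sorted (heights : List Int) :
    ((PySem.List.sorted (PySem.Set.ofList heights) (fun x => x) false).flatMap
        (fun k => List.replicate (heights.count k) k))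
      = PySem.List.sorted heights (fun x => x) false := by
  set ks := PySem.List.sorted (PySem.Set.ofList heights) (fun x => x) false with hks
  have hmem : ∀ v : Int, v ∈ ks ↔ v ∈ heights := by
    intro v
    rw [hks, PySem.List.mem_sorted, PySem.Set.mem_ofList]
  have hnd : ks.Nodup := by
    have := PySem.List.sorted_perm (PySem.Set.ofList heights) (fun x : Int => x) false
    exact this.nodup_iff.mpr (PySem.Set.nodup_ofList heights)
  have hperm : (ks.flatMap (fun k => List.replicate (heights.count k) k)).Perm heights := by
    rw [List.perm_iff_count]
    intro v
    rw [count_flat_replicate ks _ v hnd]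
    by_cases hv : v ∈ heights
    · simp [(hmem v).mpr hv]
    · simp [List.count_eq_zero_of_not_mem hv]
  have hpw : (ks.flatMap (fun k => List.replicate (heights.count k) k)).Pairwise (· ≤ ·) :=
    pairwise_flat_replicate ks _ (by
      rw [hks]; exact PySem.List.sorted_ofList_pairwise_lt heights)
  exact (PySem.List.sorted_id_eq_of_perm_of_pairwise _ _ hperm hpw).symm

-- B's foldl-append expansion loop equals the flatMap form
theorem foldl_append_replicate (ks : List Int) (g : Int → List Int) (acc : List Int) :
    ks.foldl (fun acc k => acc ++ g k) acc = acc ++ ks.flatMap g := by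
  induction ks generalizing acc with
  | nil => simp
  | cons k ks ih => simp [ih, List.flatMap_cons]

-- ===== VERDICT (by name: the statement is the Claim_ definition above) =====
theorem heightChecker1_spec : Claim_equal_heightChecker1 := by
  intro heights _
  unfold Spec_heightChecker1 heightChecker1 heightChecker1_alt
  simp only [PySem.Dict.foldl_insert_getD_add_one_eq_counter, PySem.Dict.keys_counter,
    PySem.Dict.getD_counter, Int.toNat_natCast]
  rw [loop_eq_zip_foldl, foldl_append_replicate, List.nil_append, expand_eq_sorted]
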